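-- pv_equiv track=rewrite | github.com/zhoubintao-bytedance/rqalpha | skyeye/products/tx1/autoresearch/git_ops.py | ensure_read_only_paths_untouched
-- ===== SOURCE A (Python) =====
-- def ensure_read_only_paths_untouched(changed_paths: list[str], read_only_roots: list[str]) -> list[str]:
--     """检查变更列表里是否命中了只读路径。"""
--     hits = []
--     for changed_path in changed_paths:
--         for read_only_root in read_only_roots:
--             if str(changed_path).startswith(str(read_only_root)):
--                 hits.append(str(changed_path))
--                 break
--     return hits
-- ===== SOURCE B (Python) =====
-- def ensure_read_only_paths_untouched(changed_paths: list[str], read_only_roots: list[str]) -> list[str]: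
--     # Hash the roots once; per path test only the distinct root lengths via
--     # prefix lookups, so the inner scan over all roots disappears.
--     roots = set(read_only_roots)
--     lengths = {len(r) for r in read_only_roots}
--     hits = []
--     for p in changed_paths:
--         n = len(p)
--         if any(k <= n and p[:k] in roots for k in lengths):
--             hits.append(p)
--     return hits
-- ===== Notes on version B (the rewrite author's own statement) =====
-- stated objective: faster
-- what changed: B builds a hash set of the roots and of their distinct lengths once, then tests each path by looking up its prefixes at those lengths, instead of scanning every root per path with startswith.
import Mathlib
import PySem

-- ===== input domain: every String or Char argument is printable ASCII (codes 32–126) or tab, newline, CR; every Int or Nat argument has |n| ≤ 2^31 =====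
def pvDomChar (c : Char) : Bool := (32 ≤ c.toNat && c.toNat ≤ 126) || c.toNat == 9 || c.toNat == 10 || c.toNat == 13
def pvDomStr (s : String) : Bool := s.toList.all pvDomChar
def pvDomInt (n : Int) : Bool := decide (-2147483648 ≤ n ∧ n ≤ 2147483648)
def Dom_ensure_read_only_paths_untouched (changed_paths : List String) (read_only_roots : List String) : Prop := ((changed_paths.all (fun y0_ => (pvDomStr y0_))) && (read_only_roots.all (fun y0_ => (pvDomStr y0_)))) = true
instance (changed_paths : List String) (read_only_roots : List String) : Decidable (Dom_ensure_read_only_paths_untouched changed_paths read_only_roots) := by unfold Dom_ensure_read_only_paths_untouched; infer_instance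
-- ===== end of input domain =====

-- B hashes the roots once and tests each path only at the distinct root lengths
-- (prefix lookups in a set), removing the inner scan over all roots (objective: alternative).

-- ===== PORT A =====
-- inner 'for read_only_root in read_only_roots: … break' of A
def pvHitA (p : String) : List String → Bool
  | [] => false
  | r :: rest => if PySem.Str.startswith p r then true else pvHitA p rest

def ensure_read_only_paths_untouched (changed_paths : List String) (read_only_roots : List String) : List String :=
  changed_paths.foldl
    (fun hits p => if pvHitA p read_only_roots then hits ++ [p] else hits) []

-- ===== PORT B =====
def ensure_read_only_paths_untouched_alt (changed_paths : List String) (read_only_roots : List String) : List String :=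
  let roots : PySem.Set String := PySem.Set.ofList read_only_roots
  let lengths : PySem.Set Int := PySem.Set.ofList (read_only_roots.map PySem.Str.len)
  changed_paths.foldl
    (fun hits p =>
      let n := PySem.Str.len p
      if lengths.any (fun k =>
          decide (k ≤ n) && PySem.Set.contains roots (PySem.Str.slice p none (some k)))
      then hits ++ [p] else hits) []

-- ===== PRECONDITION & SPEC =====
def Spec_ensure_read_only_paths_untouched (changed_paths : List String) (read_only_roots : List String) (out : List String) : Prop := out = ensure_read_only_paths_untouched_alt changed_paths read_only_roots
instance (changed_paths : List String) (read_only_roots : List String) (out : List String) : Decidable (Spec_ensure_read_only_paths_untouched changed_paths read_only_roots out) := by unfold Spec_ensure_read_only_paths_untouched; infer_instance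

-- ===== CLAIM (what is proved, stated in full; the proofs are below) =====
def Claim_equal_ensure_read_only_paths_untouched : Prop := ∀ (changed_paths : List String) (read_only_roots : List String), Dom_ensure_read_only_paths_untouched changed_paths read_only_roots → Spec_ensure_read_only_paths_untouched changed_paths read_only_roots (ensure_read_only_paths_untouched changed_paths read_only_roots)

-- ===== LEMMAS AND PROOFS =====

-- A's inner break-loop is an 'any' over the roots
theorem pvHitA_eq_any (p : String) (l : List String) :
    pvHitA p l = l.any (fun r => PySem.Str.startswith p r) := by
  induction l with
  | nil => rfl
  | cons r rest ih => simp [pvHitA, ih]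

-- per-path agreement of the two hit tests
theorem pvHit_agree (p : String) (rros : List String) :
    pvHitA p rros =
      (PySem.Set.ofList (rros.map PySem.Str.len)).any (fun k =>
        decide (k ≤ PySem.Str.len p) &&
        PySem.Set.contains (PySem.Set.ofList rros) (PySem.Str.slice p none (some k))) := by
  rw [pvHitA_eq_any]
  apply Bool.eq_iff_iff.mpr
  simp only [List.any_eq_true, Bool.and_eq_true, decide_eq_true_eq]
  constructor
  · rintro ⟨r, hr, hsw⟩
    refine ⟨PySem.Str.len r, ?_, ?_, ?_⟩
    · exact (PySem.Set.mem_ofList _ _).mpr (List.mem_map_of_mem hr)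
    · have hpre : r.toList <+: p.toList := by
        have : r.toList.isPrefixOf p.toList = true := by
          simpa [PySem.Str.startswith, PySem.Chars.startswith] using hsw
        exact List.isPrefixOf_iff_prefix.mp this
      rw [PySem.Str.len_eq, PySem.Str.len_eq]
      exact_mod_cast hpre.length_le
    · have hpre : r.toList <+: p.toList := by
        have : r.toList.isPrefixOf p.toList = true := by
          simpa [PySem.Str.startswith, PySem.Chars.startswith] using hsw
        exact List.isPrefixOf_iff_prefix.mp this
      have hslice : PySem.Str.slice p none (some (PySem.Str.len r)) = r := by
        have htake : p.toList.take r.toList.length = r.toList :=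
          (List.prefix_iff_eq_take.mp hpre).symm
        simp only [PySem.Str.slice, PySem.Chars.slice, PySem.Str.len_eq]
        rw [PySem.List.slice_to_natCast, htake]
        simp
      rw [hslice]
      exact (PySem.Set.contains_iff _ _).mpr ((PySem.Set.mem_ofList _ _).mpr hr)
  · rintro ⟨k, hk, hkn, hmem⟩
    have hmem' : PySem.Str.slice p none (some k) ∈ rros :=
      (PySem.Set.mem_ofList _ _).mp ((PySem.Set.contains_iff _ _).mp hmem)
    refine ⟨PySem.Str.slice p none (some k), hmem', ?_⟩
    -- k is the length of some root, so 0 ≤ k; p[:k] is a prefix of p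
    have hk0 : 0 ≤ k := by
      rcases List.mem_map.mp ((PySem.Set.mem_ofList _ _).mp hk) with ⟨r, _, rfl⟩
      simp [PySem.Str.len_eq]
    obtain ⟨m, rfl⟩ := Int.eq_ofNat_of_zero_le hk0
    have : (PySem.Str.slice p none (some (m : Int))).toList = p.toList.take m := by
      simp [PySem.Str.slice, PySem.Chars.slice, PySem.List.slice_to_natCast]
    simp only [PySem.Str.startswith, PySem.Chars.startswith, this]
    exact List.isPrefixOf_iff_prefix.mpr (List.take_prefix m p.toList)

-- ===== VERDICT (by name: the statement is the Claim_ definition above) =====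
theorem ensure_read_only_paths_untouched_spec : Claim_equal_ensure_read_only_paths_untouched := by
  intro changed_paths read_only_roots _
  unfold Spec_ensure_read_only_paths_untouched
  unfold ensure_read_only_paths_untouched ensure_read_only_paths_untouched_alt
  exact (PySem.List.foldl_congr_mem _ _ _ _
    (fun hits p _ => by rw [pvHit_agree p read_only_roots])).symm
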